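-- pv_equiv track=rewrite | github.com/Brian-T-Chan/Using-Groth16-to-Verify-Alberta-Income-Tax-Bracket | circuit/python/alberta.py | alberta_income_bracket
-- ===== SOURCE A (Python) =====
-- def alberta_income_bracket(employment_income,
--                    self_employment_income,
--                    rental_income,
--                    investment_income,
--                    pension_or_retirement_income,
--                    other_taxable_benefits,
--                    rrsp_contributions,
--                    union_professional_dues,
--                    childcare_expenses,
--                    moving_expenses,
--                    business_or_employment_expenses,
--                    support_payments):
--
--     gross_income = (
--         employment_income +
--         self_employment_income +
--         rental_income +
--         investment_income +
--         pension_or_retirement_income +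
--         other_taxable_benefits
--     )
--
--     deductions = (
--         rrsp_contributions +
--         union_professional_dues +
--         childcare_expenses +
--         moving_expenses +
--         business_or_employment_expenses +
--         support_payments
--     )
--
--     if gross_income < deductions:
--         return False
--
--     taxable_income = gross_income - deductions
--
--     # Thresholds for Alberta tax brackets (2023) in cents
--     thresholds = [0, 13122000, 15746400, 20995200, 31492800]
--
--     number_of_brackets = 5
--
--     for i in range(number_of_brackets - 1):
--         if taxable_income >= thresholds[i] and taxable_income < thresholds[i+1]:
--             return i+1
--
--     return 5
-- ===== SOURCE B (Python) =====
-- def alberta_income_bracket(employment_income,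
--                    self_employment_income,
--                    rental_income,
--                    investment_income,
--                    pension_or_retirement_income,
--                    other_taxable_benefits,
--                    rrsp_contributions,
--                    union_professional_dues,
--                    childcare_expenses,
--                    moving_expenses,
--                    business_or_employment_expenses,
--                    support_payments):
--     gross_income = (employment_income + self_employment_income + rental_income +
--                     investment_income + pension_or_retirement_income + other_taxable_benefits)
--     deductions = (rrsp_contributions + union_professional_dues + childcare_expenses +
--                   moving_expenses + business_or_employment_expenses + support_payments)
--     if gross_income < deductions:
--         return False
--     taxable_income = gross_income - deductions
--     # Counting decomposition: bracket = number of thresholds not exceeding taxable income.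
--     return sum(1 for t in (0, 13122000, 15746400, 20995200, 31492800) if taxable_income >= t)
-- ===== Notes on version B (the rewrite author's own statement) =====
-- stated objective: simpler
-- what changed: Replaces the two-sided interval scan with early return by a single counting pass: the bracket is the number of thresholds not exceeding taxable income.
-- outside the precondition, e.g. on alberta_income_bracket(0, 0, 0, 0, 0, 0, 1, 0, 0, 0, 0, 0): A returns False, B returns False
import Mathlib
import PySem

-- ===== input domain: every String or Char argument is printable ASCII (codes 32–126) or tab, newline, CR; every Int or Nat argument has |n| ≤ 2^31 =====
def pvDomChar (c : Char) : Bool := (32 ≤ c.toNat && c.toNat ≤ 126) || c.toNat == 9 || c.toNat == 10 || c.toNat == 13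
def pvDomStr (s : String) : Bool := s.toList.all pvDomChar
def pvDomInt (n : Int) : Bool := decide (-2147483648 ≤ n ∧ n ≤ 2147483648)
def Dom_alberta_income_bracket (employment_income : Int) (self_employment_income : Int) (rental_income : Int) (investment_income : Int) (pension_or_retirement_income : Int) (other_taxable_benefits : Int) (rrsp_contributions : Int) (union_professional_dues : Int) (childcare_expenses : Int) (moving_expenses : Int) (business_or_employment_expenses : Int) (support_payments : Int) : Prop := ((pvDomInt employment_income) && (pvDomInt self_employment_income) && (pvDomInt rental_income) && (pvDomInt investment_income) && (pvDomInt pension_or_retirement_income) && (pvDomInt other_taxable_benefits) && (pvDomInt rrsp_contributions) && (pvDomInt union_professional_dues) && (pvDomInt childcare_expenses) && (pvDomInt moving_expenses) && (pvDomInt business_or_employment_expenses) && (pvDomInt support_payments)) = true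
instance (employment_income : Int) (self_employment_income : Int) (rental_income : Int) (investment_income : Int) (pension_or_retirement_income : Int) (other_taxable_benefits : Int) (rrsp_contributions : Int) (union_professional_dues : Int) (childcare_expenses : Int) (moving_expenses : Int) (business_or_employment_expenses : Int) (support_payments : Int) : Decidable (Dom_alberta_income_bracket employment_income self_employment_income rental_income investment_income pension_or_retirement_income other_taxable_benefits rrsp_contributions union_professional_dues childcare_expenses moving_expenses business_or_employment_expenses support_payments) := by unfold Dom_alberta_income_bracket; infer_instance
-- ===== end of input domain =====

-- B replaces A's interval scan with a single counting pass over the thresholds (simpler decomposition).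


-- ===== PORT A =====
-- A's for-loop over range(number_of_brackets-1) with mid-loop return: structural recursion
-- over the index list; thresholds[i] / thresholds[i+1] via pyGet? (always in range here).
def albertaLoop (thresholds : List Int) (taxable_income : Int) : List Int → Int
  | [] => 5
  | i :: rest =>
    match PySem.List.pyGet? thresholds i, PySem.List.pyGet? thresholds (i+1) with
    | some lo, some hi =>
        if taxable_income ≥ lo ∧ taxable_income < hi then i + 1
        else albertaLoop thresholds taxable_income rest
    | _, _ => 5  -- unreachable: IndexError would be raised; indices stay in range

def alberta_income_bracket (employment_income : Int) (self_employment_income : Int) (rental_income : Int) (investment_income : Int) (pension_or_retirement_income : Int) (other_taxable_benefits : Int) (rrsp_contributions : Int) (union_professional_dues : Int) (childcare_expenses : Int) (moving_expenses : Int) (business_or_employment_expenses : Int) (support_payments : Int) : Int :=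
  let gross_income := employment_income + self_employment_income + rental_income +
    investment_income + pension_or_retirement_income + other_taxable_benefits
  let deductions := rrsp_contributions + union_professional_dues + childcare_expenses +
    moving_expenses + business_or_employment_expenses + support_payments
  if gross_income < deductions then 0  -- Python returns False (== 0)
  else
    let taxable_income := gross_income - deductions
    let thresholds : List Int := [0, 13122000, 15746400, 20995200, 31492800]
    let number_of_brackets : Int := 5
    albertaLoop thresholds taxable_income (PySem.List.pyRange 0 (number_of_brackets - 1) 1)

-- ===== PORT B =====
def alberta_income_bracket_alt (employment_income : Int) (self_employment_income : Int) (rental_income : Int) (investment_income : Int) (pension_or_retirement_income : Int) (other_taxable_benefits : Int) (rrsp_contributions : Int) (union_professional_dues : Int) (childcare_expenses : Int) (moving_expenses : Int) (business_or_employment_expenses : Int) (support_payments : Int) : Int :=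
  let gross_income := employment_income + self_employment_income + rental_income +
    investment_income + pension_or_retirement_income + other_taxable_benefits
  let deductions := rrsp_contributions + union_professional_dues + childcare_expenses +
    moving_expenses + business_or_employment_expenses + support_payments
  if gross_income < deductions then 0  -- Python returns False (== 0)
  else
    let taxable_income := gross_income - deductions
    -- sum(1 for t in thresholds if taxable_income >= t)
    ([(0:Int), 13122000, 15746400, 20995200, 31492800].foldl
      (fun acc t => if taxable_income ≥ t then acc + 1 else acc) 0)

-- ===== PRECONDITION & SPEC =====
-- Pre_ excludes inputs with gross income below deductions: there Python A returns False,
-- a bool outside the declared int return type (B does the same).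
def Pre_alberta_income_bracket (employment_income : Int) (self_employment_income : Int) (rental_income : Int) (investment_income : Int) (pension_or_retirement_income : Int) (other_taxable_benefits : Int) (rrsp_contributions : Int) (union_professional_dues : Int) (childcare_expenses : Int) (moving_expenses : Int) (business_or_employment_expenses : Int) (support_payments : Int) : Prop :=
  rrsp_contributions + union_professional_dues + childcare_expenses + moving_expenses + business_or_employment_expenses + support_payments ≤ employment_income + self_employment_income + rental_income + investment_income + pension_or_retirement_income + other_taxable_benefits
instance (employment_income : Int) (self_employment_income : Int) (rental_income : Int) (investment_income : Int) (pension_or_retirement_income : Int) (other_taxable_benefits : Int) (rrsp_contributions : Int) (union_professional_dues : Int) (childcare_expenses : Int) (moving_expenses : Int) (business_or_employment_expenses : Int) (support_payments : Int) : Decidable (Pre_alberta_income_bracket employment_income self_employment_income rental_income investment_income pension_or_retirement_income other_taxable_benefits rrsp_contributions union_professional_dues childcare_expenses moving_expenses business_or_employment_expenses support_payments) := by unfold Pre_alberta_income_bracket; infer_instance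
def pvWitness_alberta_income_bracket : Int × Int × Int × Int × Int × Int × Int × Int × Int × Int × Int × Int := (5000000, 0, 0, 0, 0, 0, 100, 0, 0, 0, 0, 0)
def Spec_alberta_income_bracket (employment_income : Int) (self_employment_income : Int) (rental_income : Int) (investment_income : Int) (pension_or_retirement_income : Int) (other_taxable_benefits : Int) (rrsp_contributions : Int) (union_professional_dues : Int) (childcare_expenses : Int) (moving_expenses : Int) (business_or_employment_expenses : Int) (support_payments : Int) (out : Int) : Prop := out = alberta_income_bracket_alt employment_income self_employment_income rental_income investment_income pension_or_retirement_income other_taxable_benefits rrsp_contributions union_professional_dues childcare_expenses moving_expenses business_or_employment_expenses support_payments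
instance (employment_income : Int) (self_employment_income : Int) (rental_income : Int) (investment_income : Int) (pension_or_retirement_income : Int) (other_taxable_benefits : Int) (rrsp_contributions : Int) (union_professional_dues : Int) (childcare_expenses : Int) (moving_expenses : Int) (business_or_employment_expenses : Int) (support_payments : Int) (out : Int) : Decidable (Spec_alberta_income_bracket employment_income self_employment_income rental_income investment_income pension_or_retirement_income other_taxable_benefits rrsp_contributions union_professional_dues childcare_expenses moving_expenses business_or_employment_expenses support_payments out) := by unfold Spec_alberta_income_bracket; infer_instance

-- ===== CLAIM (what is proved, stated in full; the proofs are below) =====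
def Claim_equal_alberta_income_bracket : Prop := ∀ (employment_income : Int) (self_employment_income : Int) (rental_income : Int) (investment_income : Int) (pension_or_retirement_income : Int) (other_taxable_benefits : Int) (rrsp_contributions : Int) (union_professional_dues : Int) (childcare_expenses : Int) (moving_expenses : Int) (business_or_employment_expenses : Int) (support_payments : Int), Dom_alberta_income_bracket employment_income self_employment_income rental_income investment_income pension_or_retirement_income other_taxable_benefits rrsp_contributions union_professional_dues childcare_expenses moving_expenses business_or_employment_expenses support_payments → Pre_alberta_income_bracket employment_income self_employment_income rental_income investment_income pension_or_retirement_income other_taxable_benefits rrsp_contributions union_professional_dues childcare_expenses moving_expenses business_or_employment_expenses support_payments → Spec_alberta_income_bracket employment_income self_employment_income rental_income investment_income pension_or_retirement_income other_taxable_benefits rrsp_contributions union_professional_dues childcare_expenses moving_expenses business_or_employment_expenses support_payments (alberta_income_bracket employment_income self_employment_income rental_income investment_income pension_or_retirement_income other_taxable_benefits rrsp_contributions union_professional_dues childcare_expenses moving_expenses business_or_employment_expenses support_payments)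

-- ===== LEMMAS AND PROOFS =====
lemma alberta_branch_eq (t : Int) (ht : 0 ≤ t) :
    albertaLoop [0, 13122000, 15746400, 20995200, 31492800] t (PySem.List.pyRange 0 4 1)
      = ([(0:Int), 13122000, 15746400, 20995200, 31492800].foldl
          (fun acc u => if t ≥ u then acc + 1 else acc) 0) := by
  have hr : PySem.List.pyRange 0 4 1 = [0, 1, 2, 3] := by decide
  rw [hr]
  have h0 : PySem.List.pyGet? [(0:Int), 13122000, 15746400, 20995200, 31492800] 0 = some 0 := by decide
  have h1 : PySem.List.pyGet? [(0:Int), 13122000, 15746400, 20995200, 31492800] 1 = some 13122000 := by decide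
  have h2 : PySem.List.pyGet? [(0:Int), 13122000, 15746400, 20995200, 31492800] 2 = some 15746400 := by decide
  have h3 : PySem.List.pyGet? [(0:Int), 13122000, 15746400, 20995200, 31492800] 3 = some 20995200 := by decide
  have h4 : PySem.List.pyGet? [(0:Int), 13122000, 15746400, 20995200, 31492800] 4 = some 31492800 := by decide
  simp only [albertaLoop, List.foldl]
  norm_num [h0, h1, h2, h3, h4, show Int.toNat 2 = 2 from rfl, show Int.toNat 3 = 3 from rfl, show Int.toNat 4 = 4 from rfl, List.getElem_cons_zero, List.getElem_cons_succ]
  split_ifs <;> omega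

-- ===== VERDICT (by name: the statement is the Claim_ definition above) =====
theorem alberta_income_bracket_spec : Claim_equal_alberta_income_bracket := by
  intro e s r i p o rr u c m b sp _ hpre
  unfold Pre_alberta_income_bracket at hpre
  unfold Spec_alberta_income_bracket alberta_income_bracket alberta_income_bracket_alt
  have h : ¬ (e + s + r + i + p + o < rr + u + c + m + b + sp) := by omega
  simp only [h, if_false]
  have := alberta_branch_eq (e + s + r + i + p + o - (rr + u + c + m + b + sp)) (by omega)
  norm_num at this ⊢
  exact this
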